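-- pv_equiv track=rewrite | github.com/Cesar-Ortiz/calculadora-de-numeros-complejos | calculadoracomple.py | multivector
-- ===== SOURCE A (Python) =====
-- def suma(a,b):
--     c=a[0]+b[0]
--     d=a[1]+b[1]
--     return impri(c,d)
--
-- def multi(a,b):
--     c=a[0]*b[0]-a[1]*b[1]
--     d=a[0]*b[1]+a[1]*b[0]
--     return impri(c,d)
--
-- def impri(a,b):
--     z=[]
--     z.append(a)
--     z.append(b)
--     return z
--
-- def multivector(a,b):
--     l=[]
--     for i in range(len(a)):
--         l.append(multi(a[i],b[i]))
--     while len(l)>1: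
--         l[0]=suma(l[0],l[-1])
--         l.pop()
--     return l[0]
-- ===== SOURCE B (Python) =====
-- def multivector(a, b):
--     re = sum(p[0] * q[0] - p[1] * q[1] for p, q in zip(a, b))
--     im = sum(p[0] * q[1] + p[1] * q[0] for p, q in zip(a, b))
--     return [re, im]
-- ===== Notes on version B (the rewrite author's own statement) =====
-- stated objective: simpler
-- what changed: Replaced the build-a-product-list-then-reduce-with-a-while-loop-and-pop structure by two direct sums over zip(a, b) (integer addition is associative/commutative, so the fold order does not matter), returning [re, im].
import Mathlib
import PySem

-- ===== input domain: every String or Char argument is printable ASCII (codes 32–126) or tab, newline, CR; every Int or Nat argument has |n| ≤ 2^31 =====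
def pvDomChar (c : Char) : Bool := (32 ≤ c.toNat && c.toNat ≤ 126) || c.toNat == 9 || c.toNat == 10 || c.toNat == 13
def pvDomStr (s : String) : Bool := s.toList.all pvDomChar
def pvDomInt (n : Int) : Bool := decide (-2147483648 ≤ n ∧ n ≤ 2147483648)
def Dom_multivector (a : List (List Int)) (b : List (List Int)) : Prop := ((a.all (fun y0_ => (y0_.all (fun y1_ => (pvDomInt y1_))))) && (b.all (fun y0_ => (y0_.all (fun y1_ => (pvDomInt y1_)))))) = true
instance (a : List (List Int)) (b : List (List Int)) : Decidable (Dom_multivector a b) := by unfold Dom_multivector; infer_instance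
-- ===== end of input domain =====

-- B replaces A's product-list build + while/pop reduction by two direct sums over zip(a, b); objective: simpler (same cost).

-- ===== PORT A =====
-- A's helpers suma/multi (impri inlined as the 2-list literal); a[0]/a[1] ported with getD,
-- exact on Pre_ (which rules out the cases where Python's indexing raises)
def sumaA (a b : List Int) : List Int := [a.getD 0 0 + b.getD 0 0, a.getD 1 0 + b.getD 1 0]
def multiA (a b : List Int) : List Int :=
  [a.getD 0 0 * b.getD 0 0 - a.getD 1 0 * b.getD 1 0,
   a.getD 0 0 * b.getD 1 0 + a.getD 1 0 * b.getD 0 0]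
-- the while-loop: l[0] = suma(l[0], l[-1]); l.pop()
def loopA : List (List Int) → List Int
  | [] => []          -- Python raises IndexError at `return l[0]` here (excluded by Pre_)
  | [x] => x
  | x :: y :: ys => loopA (sumaA x ((y :: ys).getLast (by simp)) :: (y :: ys).dropLast)
termination_by l => l.length
decreasing_by simp

def multivector (a : List (List Int)) (b : List (List Int)) : List Int :=
  loopA ((List.range a.length).map (fun i => multiA (a.getD i []) (b.getD i [])))

-- ===== PORT B =====
def multivector_alt (a : List (List Int)) (b : List (List Int)) : List Int :=
  let re := ((a.zip b).map (fun pq => pq.1.getD 0 0 * pq.2.getD 0 0 - pq.1.getD 1 0 * pq.2.getD 1 0)).sum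
  let im := ((a.zip b).map (fun pq => pq.1.getD 0 0 * pq.2.getD 1 0 + pq.1.getD 1 0 * pq.2.getD 0 0)).sum
  [re, im]

-- ===== PRECONDITION & SPEC =====
-- Pre_ excludes exactly the inputs on which A raises IndexError: empty a, b shorter than a,
-- or some a[i]/b[i] (i < len(a)) with fewer than 2 components.
def Pre_multivector (a : List (List Int)) (b : List (List Int)) : Prop :=
  a ≠ [] ∧ a.length ≤ b.length ∧ (∀ x ∈ a, 2 ≤ x.length) ∧ (∀ x ∈ b.take a.length, 2 ≤ x.length)
instance (a : List (List Int)) (b : List (List Int)) : Decidable (Pre_multivector a b) := by unfold Pre_multivector; infer_instance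
def pvWitness_multivector : List (List Int) × List (List Int) := ([[1, 2], [3, -1]], [[0, 5], [2, 2]])

def Spec_multivector (a : List (List Int)) (b : List (List Int)) (out : List Int) : Prop := out = multivector_alt a b
instance (a : List (List Int)) (b : List (List Int)) (out : List Int) : Decidable (Spec_multivector a b out) := by unfold Spec_multivector; infer_instance

-- ===== CLAIM (what is proved, stated in full; the proofs are below) =====
def Claim_equal_multivector : Prop := ∀ (a : List (List Int)) (b : List (List Int)), Dom_multivector a b → Pre_multivector a b → Spec_multivector a b (multivector a b)

-- ===== LEMMAS AND PROOFS =====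

-- the while-loop on a nonempty list of 2-lists computes the componentwise sums
theorem loopA_sum (l : List (List Int)) (hne : l ≠ []) (h2 : ∀ x ∈ l, ∃ c d, x = [c, d]) :
    loopA l = [(l.map (fun x => x.getD 0 0)).sum, (l.map (fun x => x.getD 1 0)).sum] := by
  induction l using loopA.induct with
  | case1 => simp at hne
  | case2 x =>
    obtain ⟨c, d, rfl⟩ := h2 x (by simp)
    simp [loopA]
  | case3 x y ys ih =>
    have hmem : ∀ z ∈ sumaA x ((y :: ys).getLast (by simp)) :: (y :: ys).dropLast, ∃ c d, z = [c, d] := by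
      intro z hz
      rw [List.mem_cons] at hz
      rcases hz with rfl | hz
      · exact ⟨_, _, rfl⟩
      · exact h2 z (List.mem_cons_of_mem _ (List.dropLast_subset _ hz))
    rw [loopA, ih (by simp) hmem]
    have hsplit : (y :: ys).dropLast ++ [(y :: ys).getLast (by simp)] = y :: ys :=
      List.dropLast_append_getLast (by simp)
    have key0 : y.getD 0 0 + (List.map (fun x : List Int => x.getD 0 0) ys).sum
        = (List.map (fun x : List Int => x.getD 0 0) (y :: ys).dropLast).sum
          + ((y :: ys).getLast (by simp)).getD 0 0 := by
      have h := congrArg (fun t => (List.map (fun x : List Int => x.getD 0 0) t).sum) hsplit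
      simpa using h.symm
    have key1 : y.getD 1 0 + (List.map (fun x : List Int => x.getD 1 0) ys).sum
        = (List.map (fun x : List Int => x.getD 1 0) (y :: ys).dropLast).sum
          + ((y :: ys).getLast (by simp)).getD 1 0 := by
      have h := congrArg (fun t => (List.map (fun x : List Int => x.getD 1 0) t).sum) hsplit
      simpa using h.symm
    simp only [List.map_cons, List.sum_cons, key0, key1, sumaA]
    simp only [List.getD_cons_zero, List.getD_cons_succ, List.cons.injEq, and_true]
    exact ⟨by ring, by ring⟩

-- the two index-driven maps of A's product pass coincide with B's zip maps
theorem range_map_eq_zip_map (a b : List (List Int)) (hlen : a.length ≤ b.length)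
    (g : List Int → List Int → Int) :
    (List.range a.length).map (fun i => g (a.getD i []) (b.getD i []))
      = (a.zip b).map (fun pq => g pq.1 pq.2) := by
  apply List.ext_getElem
  · simp [Nat.min_eq_left hlen]
  · intro i h1 h2
    have hia : i < a.length := by simpa using h1
    have hib : i < b.length := lt_of_lt_of_le hia hlen
    simp [List.getD_eq_getElem?_getD, hia, hib]

theorem multivector_spec : Claim_equal_multivector := by
  intro a b _ hpre
  obtain ⟨hne, hlen, _, _⟩ := hpre
  unfold Spec_multivector multivector
  rw [loopA_sum _ (by simpa using hne)
      (by intro x hx; simp only [List.mem_map] at hx; obtain ⟨i, _, rfl⟩ := hx; exact ⟨_, _, rfl⟩)]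
  have e0 : (List.range a.length).map (fun i =>
        (a.getD i []).getD 0 0 * (b.getD i []).getD 0 0 - (a.getD i []).getD 1 0 * (b.getD i []).getD 1 0)
      = (a.zip b).map (fun pq => pq.1.getD 0 0 * pq.2.getD 0 0 - pq.1.getD 1 0 * pq.2.getD 1 0) :=
    range_map_eq_zip_map a b hlen (fun p q => p.getD 0 0 * q.getD 0 0 - p.getD 1 0 * q.getD 1 0)
  have e1 : (List.range a.length).map (fun i =>
        (a.getD i []).getD 0 0 * (b.getD i []).getD 1 0 + (a.getD i []).getD 1 0 * (b.getD i []).getD 0 0)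
      = (a.zip b).map (fun pq => pq.1.getD 0 0 * pq.2.getD 1 0 + pq.1.getD 1 0 * pq.2.getD 0 0) :=
    range_map_eq_zip_map a b hlen (fun p q => p.getD 0 0 * q.getD 1 0 + p.getD 1 0 * q.getD 0 0)
  simp only [multivector_alt, List.map_map]
  rw [← e0, ← e1]
  rfl
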